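-- pv_equiv track=rewrite | github.com/msruseva/Python | week4/winter.py | winter_is_coming
-- ===== SOURCE A (Python) =====
-- def winter_is_coming(seasons):
--     is_coming = False
--
--     counter = 0
--
--     for season in seasons:
--         if season == "winter":
--             counter = 0
--         else:
--             counter += 1
--
--         if counter == 5:
--             is_coming = True
--             break
--
--     return is_coming
-- ===== SOURCE B (Python) =====
-- def winter_is_coming(seasons):
--     # Build maximal runs (key, length), keyed on "is winter", then test runs.
--     runs = []
--     i, n = 0, len(seasons)
--     while i < n:
--         k = seasons[i] == "winter"
--         j = i + 1
--         while j < n and (seasons[j] == "winter") == k: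
--             j += 1
--         runs.append((k, j - i))
--         i = j
--     return any((not k) and ln >= 5 for k, ln in runs)
-- ===== Notes on version B (the rewrite author's own statement) =====
-- stated objective: alternative
-- what changed: Replaces the reset-counter scan with an explicit decomposition: segment the list into maximal runs keyed on equality with 'winter', then test whether any non-winter run has length >= 5.
import Mathlib
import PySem

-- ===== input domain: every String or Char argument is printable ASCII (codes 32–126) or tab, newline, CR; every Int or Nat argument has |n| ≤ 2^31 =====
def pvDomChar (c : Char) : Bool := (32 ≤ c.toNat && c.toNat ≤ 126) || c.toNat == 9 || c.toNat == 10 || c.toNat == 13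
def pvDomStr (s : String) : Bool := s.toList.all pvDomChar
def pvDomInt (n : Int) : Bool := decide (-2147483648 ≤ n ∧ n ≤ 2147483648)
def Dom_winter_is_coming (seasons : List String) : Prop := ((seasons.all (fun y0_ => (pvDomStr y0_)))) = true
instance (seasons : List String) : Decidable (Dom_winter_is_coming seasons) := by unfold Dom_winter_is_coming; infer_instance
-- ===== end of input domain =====

-- ===== PORT A =====
-- Header: B replaces A's reset-counter scan with a build-maximal-runs-then-test decomposition (same O(n) cost).
-- A: counter scan with early break once counter hits 5.
def winterGoA : List String → Nat → Bool
  | [], _ => false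
  | s :: rest, counter =>
    let c := if s == "winter" then 0 else counter + 1
    if c == 5 then true else winterGoA rest c

def winter_is_coming (seasons : List String) : Bool := winterGoA seasons 0

-- ===== PORT B =====
-- B: split into maximal runs (key, length), keyed on equality with "winter".
def winterRuns : List String → List (Bool × Nat)
  | [] => []
  | s :: rest =>
    let k := s == "winter"
    (k, 1 + (rest.takeWhile (fun t => (t == "winter") == k)).length)
      :: winterRuns (rest.dropWhile (fun t => (t == "winter") == k))
termination_by l => l.length
decreasing_by
  simp only [List.length_cons]
  exact Nat.lt_succ_of_le (List.length_dropWhile_le _ _)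

def winter_is_coming_alt (seasons : List String) : Bool :=
  (winterRuns seasons).any (fun p => !p.1 && decide (5 ≤ p.2))

-- ===== PRECONDITION & SPEC =====
def Spec_winter_is_coming (seasons : List String) (out : Bool) : Prop := out = winter_is_coming_alt seasons
instance (seasons : List String) (out : Bool) : Decidable (Spec_winter_is_coming seasons out) := by unfold Spec_winter_is_coming; infer_instance

-- ===== CLAIM (what is proved, stated in full; the proofs are below) =====
def Claim_equal_winter_is_coming : Prop := ∀ (seasons : List String), Dom_winter_is_coming seasons → Spec_winter_is_coming seasons (winter_is_coming seasons)

-- ===== LEMMAS AND PROOFS =====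

-- skipping a block of "winter" elements resets/keeps counter 0
theorem winterGoA_winter_block (t r : List String)
    (h : ∀ x ∈ t, (x == "winter") = true) :
    winterGoA (t ++ r) 0 = winterGoA r 0 := by
  induction t with
  | nil => rfl
  | cons x t ih =>
    have hx := h x (List.mem_cons_self ..)
    simp only [List.cons_append, winterGoA, hx]
    exact ih (fun y hy => h y (List.mem_cons_of_mem _ hy))

-- crossing a block of non-"winter" elements
theorem winterGoA_nonwinter_block (t : List String) (r : List String) (c : Nat)
    (h : ∀ x ∈ t, (x == "winter") = false) (hc : c < 5) :
    winterGoA (t ++ r) c =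
      if 5 ≤ c + t.length then true else winterGoA r (c + t.length) := by
  induction t generalizing c with
  | nil =>
    simp only [List.nil_append, List.length_nil, Nat.add_zero]
    rw [if_neg (by omega)]
  | cons x t ih =>
    have hx := h x (List.mem_cons_self ..)
    simp only [List.cons_append, winterGoA, hx, if_neg (Bool.false_ne_true), List.length_cons]
    by_cases h5 : c + 1 = 5
    · rw [if_pos (by simpa using h5), if_pos (by omega)]
    · rw [if_neg (by simpa using h5),
        ih (c + 1) (fun y hy => h y (List.mem_cons_of_mem _ hy)) (by omega),
        show c + 1 + t.length = c + (t.length + 1) from by omega]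

theorem winterGoA_eq_runs (l : List String) :
    winterGoA l 0 = (winterRuns l).any (fun p => !p.1 && decide (5 ≤ p.2)) := by
  induction hn : l.length using Nat.strong_induction_on generalizing l with
  | _ n ih =>
  cases l with
  | nil => simp [winterGoA, winterRuns]
  | cons s rest =>
    have hlt : ∀ (l' : List String), l'.length ≤ rest.length →
        winterGoA l' 0 = (winterRuns l').any (fun p => !p.1 && decide (5 ≤ p.2)) := by
      intro l' hl'
      exact ih l'.length (by subst hn; simp only [List.length_cons]; omega) l' rfl
    cases hs : (s == "winter") with
    | true =>
      rw [winterRuns]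
      simp only [hs]
      rw [show winterGoA (s :: rest) 0 = winterGoA rest 0 from by simp [winterGoA, hs]]
      conv_lhs => rw [← List.takeWhile_append_dropWhile
        (p := fun x => (x == "winter") == true) (l := rest)]
      rw [winterGoA_winter_block _ _
        (fun x hx => by simpa using List.mem_takeWhile_imp hx)]
      simp only [List.any_cons, Bool.not_true, Bool.false_and, Bool.false_or]
      exact hlt _ (List.length_dropWhile_le _ _)
    | false =>
      rw [winterRuns]
      simp only [hs]
      rw [show winterGoA (s :: rest) 0 = winterGoA rest 1 from by simp [winterGoA, hs]]
      conv_lhs => rw [← List.takeWhile_append_dropWhile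
        (p := fun x => (x == "winter") == false) (l := rest)]
      rw [winterGoA_nonwinter_block _ _ 1
        (fun x hx => by simpa using List.mem_takeWhile_imp hx) (by omega)]
      simp only [List.any_cons, Bool.not_false, Bool.true_and]
      by_cases hbig : 5 ≤ 1 + (rest.takeWhile (fun x => (x == "winter") == false)).length
      · rw [if_pos hbig, decide_eq_true hbig, Bool.true_or]
      · rw [if_neg hbig, decide_eq_false hbig, Bool.false_or]
        have hrec := hlt (rest.dropWhile (fun x => (x == "winter") == false))
          (List.length_dropWhile_le _ _)
        have hh := List.head?_dropWhile_not (fun x => (x == "winter") == false) rest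
        cases hrc : rest.dropWhile (fun x => (x == "winter") == false) with
        | nil => simp [winterGoA, winterRuns]
        | cons y r' =>
          rw [hrc] at hh hrec
          simp only [List.head?_cons] at hh
          have hy : (y == "winter") = true := by simpa using hh
          rw [show ∀ c, winterGoA (y :: r') c = winterGoA r' 0 from
              fun c => by simp [winterGoA, hy]] at hrec ⊢
          exact hrec
-- ===== VERDICT (by name: the statement is the Claim_ definition above) =====
theorem winter_is_coming_spec : Claim_equal_winter_is_coming := by
  intro seasons _
  unfold Spec_winter_is_coming winter_is_coming winter_is_coming_alt
  exact winterGoA_eq_runs seasons
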